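-- pv_equiv track=rewrite | github.com/BackofenLab/CRISPRidentify | components/detection.py | unique_gaps_end
-- ===== SOURCE A (Python) =====
-- def unique_gaps_end(list_gaps):
--     list_gaps_new = []
--     for el in list_gaps:
--         while True:
--             if el in list_gaps_new:
--                 el += 1
--             else:
--                 list_gaps_new.append(el)
--                 break
--     return list_gaps_new
-- ===== SOURCE B (Python) =====
-- def unique_gaps_end(list_gaps):
--     # Jump-pointer ("next free slot") scheme: nxt[v] points past a block of
--     # values known to be taken, so finding a free slot follows pointers
--     # instead of re-scanning the output list, and the queried entry is
--     # re-pointed past the slot just taken (path compression).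
--     nxt = {}
--     out = []
--     for el in list_gaps:
--         slot = el
--         while slot in nxt:
--             slot = nxt[slot]
--         out.append(slot)
--         nxt[el] = slot + 1
--         nxt[slot] = slot + 1
--     return out
-- ===== Notes on version B (the rewrite author's own statement) =====
-- stated objective: faster
-- what changed: A rescans the growing output list for membership and increments one step at a time; B keeps a 'next free slot' jump-pointer dict (nxt[v] points past a block of taken values, updated after each query), so each element is placed by following pointers instead of scanning the output.
import Mathlib
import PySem

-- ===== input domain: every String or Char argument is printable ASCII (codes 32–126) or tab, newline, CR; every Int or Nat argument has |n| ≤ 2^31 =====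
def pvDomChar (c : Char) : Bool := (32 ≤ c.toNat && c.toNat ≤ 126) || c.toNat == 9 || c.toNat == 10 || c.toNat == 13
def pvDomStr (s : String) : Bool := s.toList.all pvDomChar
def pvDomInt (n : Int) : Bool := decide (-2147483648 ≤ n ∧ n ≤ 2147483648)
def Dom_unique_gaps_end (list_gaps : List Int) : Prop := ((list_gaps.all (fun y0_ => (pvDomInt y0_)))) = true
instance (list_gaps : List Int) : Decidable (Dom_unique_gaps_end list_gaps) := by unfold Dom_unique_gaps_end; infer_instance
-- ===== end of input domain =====

-- B replaces A's rescan-the-output membership loop by a jump-pointer "next free slot"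
-- dictionary with compression of the queried entry (measured much faster).


-- ===== PORT A =====
-- termination helper for A's 'while True' loop: each 'el += 1' step strictly
-- shrinks the number of accumulator elements that are ≥ el
theorem pvFilterGeSuccLt (lst : List Int) (el : Int) (h : el ∈ lst) :
    (lst.filter (fun x => el + 1 ≤ x)).length < (lst.filter (fun x => el ≤ x)).length := by
  have mono : ∀ t : List Int, (t.filter (fun x => el + 1 ≤ x)).length ≤ (t.filter (fun x => el ≤ x)).length := by
    intro t
    apply List.Sublist.length_le
    apply List.monotone_filter_right
    intro x hx
    simp only [decide_eq_true_eq] at hx ⊢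
    omega
  induction lst with
  | nil => cases h
  | cons a t ih =>
    rcases List.mem_cons.mp h with rfl | hmem
    · have := mono t
      simp only [List.filter_cons]
      split_ifs <;> simp_all
    · have := ih hmem
      simp only [List.filter_cons]
      split_ifs <;> simp_all
      omega
  
-- A's inner 'while True: if el in list_gaps_new: el += 1 else: append; break'
def bumpA (lst : List Int) (el : Int) : Int :=
  if h : el ∈ lst then bumpA lst (el + 1) else el
termination_by (lst.filter (fun x => el ≤ x)).length
decreasing_by exact pvFilterGeSuccLt lst el h

def unique_gaps_end (list_gaps : List Int) : List Int :=
  list_gaps.foldl (fun list_gaps_new el => list_gaps_new ++ [bumpA list_gaps_new el]) []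

-- ===== PORT B =====
-- B's 'while slot in nxt: slot = nxt[slot]'; the fuel (out.length + 1 at the call
-- site) is only a totality guard — the proof shows it is never exhausted
def findB (d : PySem.Dict Int Int) : Nat → Int → Int
  | 0, x => x
  | fuel + 1, x =>
    match d.get? x with
    | none => x
    | some y => findB d fuel y

def unique_gaps_end_alt (list_gaps : List Int) : List Int :=
  (list_gaps.foldl
    (fun (st : List Int × PySem.Dict Int Int) el =>
      let slot := findB st.2 (st.1.length + 1) el
      (st.1 ++ [slot], (st.2.insert el (slot + 1)).insert slot (slot + 1)))
    ([], PySem.Dict.empty)).1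

-- ===== PRECONDITION & SPEC =====
def Spec_unique_gaps_end (list_gaps : List Int) (out : List Int) : Prop := out = unique_gaps_end_alt list_gaps
instance (list_gaps : List Int) (out : List Int) : Decidable (Spec_unique_gaps_end list_gaps out) := by unfold Spec_unique_gaps_end; infer_instance

-- ===== CLAIM (what is proved, stated in full; the proofs are below) =====
def Claim_equal_unique_gaps_end : Prop := ∀ (list_gaps : List Int), Dom_unique_gaps_end list_gaps → Spec_unique_gaps_end list_gaps (unique_gaps_end list_gaps)

-- ===== LEMMAS AND PROOFS =====

theorem bumpA_of_mem {lst : List Int} {el : Int} (h : el ∈ lst) :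
    bumpA lst el = bumpA lst (el + 1) := by
  rw [bumpA]; simp [h]

theorem bumpA_of_not_mem {lst : List Int} {el : Int} (h : el ∉ lst) :
    bumpA lst el = el := by
  rw [bumpA]; simp [h]

theorem bumpA_le (lst : List Int) (el : Int) : el ≤ bumpA lst el := by
  induction el using bumpA.induct lst with
  | case1 el h ih => rw [bumpA_of_mem h]; omega
  | case2 el h => rw [bumpA_of_not_mem h]

theorem bumpA_interval (lst : List Int) (el : Int) :
    ∀ z, el ≤ z → z < bumpA lst el → z ∈ lst := by
  induction el using bumpA.induct lst with
  | case1 el h ih =>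
    intro z hz1 hz2
    rw [bumpA_of_mem h] at hz2
    rcases eq_or_lt_of_le hz1 with rfl | hlt
    · exact h
    · exact ih z (by omega) hz2
  | case2 el h =>
    intro z hz1 hz2
    rw [bumpA_of_not_mem h] at hz2
    omega

theorem bumpA_congr (lst : List Int) (el y : Int) (hle : el ≤ y)
    (hiv : ∀ z, el ≤ z → z < y → z ∈ lst) : bumpA lst el = bumpA lst y := by
  generalize hk : (y - el).toNat = k
  induction k generalizing el with
  | zero =>
    have : el = y := by omega
    rw [this]
  | succ k ih =>
    have hel : el ∈ lst := hiv el le_rfl (by omega)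
    rw [bumpA_of_mem hel]
    exact ih (el + 1) (by omega) (fun z h1 h2 => hiv z (by omega) h2) (by omega)

-- invariant tying B's jump-pointer dict to the output so far: every entry
-- k ↦ v marks a solid block [k, v) of taken values, and every taken value is a key
def InvD (d : PySem.Dict Int Int) (acc : List Int) : Prop :=
  (∀ k v, d.get? k = some v → k ∈ acc ∧ k < v ∧ ∀ z, k ≤ z → z < v → z ∈ acc) ∧
  (∀ x ∈ acc, ∃ v, d.get? x = some v)

theorem findB_eq_bumpA (fuel : Nat) :
    ∀ (d : PySem.Dict Int Int) (acc : List Int) (el : Int), InvD d acc →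
    (acc.filter (fun x => el ≤ x)).length < fuel → findB d fuel el = bumpA acc el := by
  induction fuel with
  | zero => intro d acc el _ hf; omega
  | succ fuel ih =>
    intro d acc el hInv hf
    rcases h : d.get? el with _ | y
    · have hne : el ∉ acc := by
        intro hmem
        rcases hInv.2 el hmem with ⟨v, hv⟩
        rw [h] at hv; cases hv
      rw [bumpA_of_not_mem hne]
      simp [findB, h]
    · obtain ⟨hmem, hlt, hiv⟩ := hInv.1 el y h
      have hmono : (acc.filter (fun x => y ≤ x)).length ≤ (acc.filter (fun x => el + 1 ≤ x)).length := by
        apply List.Sublist.length_le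
        apply List.monotone_filter_right
        intro x hx
        simp only [decide_eq_true_eq] at hx ⊢
        omega
      have hstrict := pvFilterGeSuccLt acc el hmem
      have hstep : findB d (fuel + 1) el = findB d fuel y := by simp [findB, h]
      rw [hstep, ih d acc y hInv (by omega)]
      exact (bumpA_congr acc el y (by omega) (fun z h1 h2 => hiv z h1 (by omega))).symm

theorem InvD_step (d : PySem.Dict Int Int) (acc : List Int) (el : Int) (hInv : InvD d acc) :
    InvD ((d.insert el (bumpA acc el + 1)).insert (bumpA acc el) (bumpA acc el + 1))
      (acc ++ [bumpA acc el]) := by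
  have hle : el ≤ bumpA acc el := bumpA_le acc el
  have hiv := bumpA_interval acc el
  constructor
  · intro k v hkv
    rw [PySem.Dict.get?_insert, PySem.Dict.get?_insert] at hkv
    split_ifs at hkv with h1 h2
    · -- k = slot
      obtain rfl := Option.some.inj hkv
      subst h1
      refine ⟨List.mem_append_right _ (by simp), by omega, fun z hz1 hz2 => ?_⟩
      have : z = bumpA acc el := by omega
      exact List.mem_append_right _ (by simp [this])
    · -- k = el, el ≠ slot
      obtain rfl := Option.some.inj hkv
      subst h2
      have hlt : k < bumpA acc k := lt_of_le_of_ne hle (fun he => h1 he)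
      refine ⟨List.mem_append_left _ (hiv k le_rfl hlt), by omega, fun z hz1 hz2 => ?_⟩
      by_cases hz : z = bumpA acc k
      · exact List.mem_append_right _ (by simp [hz])
      · exact List.mem_append_left _ (hiv z hz1 (by omega))
    · obtain ⟨hm, hl, hi⟩ := hInv.1 k v hkv
      exact ⟨List.mem_append_left _ hm, hl, fun z hz1 hz2 => List.mem_append_left _ (hi z hz1 hz2)⟩
  · intro x hx
    rw [PySem.Dict.get?_insert, PySem.Dict.get?_insert]
    by_cases h1 : x = bumpA acc el
    · simp [h1]
    · rw [if_neg h1]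
      by_cases h2 : x = el
      · simp [h2]
      · rw [if_neg h2]
        rcases List.mem_append.mp hx with hx' | hx'
        · exact hInv.2 x hx'
        · simp only [List.mem_singleton] at hx'
          exact absurd hx' h1

theorem fold_eq (lst : List Int) :
    ∀ (acc : List Int) (d : PySem.Dict Int Int), InvD d acc →
    (lst.foldl
      (fun (st : List Int × PySem.Dict Int Int) el =>
        let slot := findB st.2 (st.1.length + 1) el
        (st.1 ++ [slot], (st.2.insert el (slot + 1)).insert slot (slot + 1)))
      (acc, d)).1
    = lst.foldl (fun list_gaps_new el => list_gaps_new ++ [bumpA list_gaps_new el]) acc := by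
  induction lst with
  | nil => intro acc d _; rfl
  | cons el t ih =>
    intro acc d hInv
    have hfe : findB d (acc.length + 1) el = bumpA acc el := by
      apply findB_eq_bumpA _ d acc el hInv
      have := List.length_filter_le (fun x => el ≤ x) acc
      omega
    simp only [List.foldl_cons, hfe]
    exact ih (acc ++ [bumpA acc el]) _ (InvD_step d acc el hInv)

theorem InvD_empty : InvD PySem.Dict.empty [] := by
  constructor
  · intro k v h
    rw [PySem.Dict.get?_empty] at h
    cases h
  · intro x hx
    cases hx

-- ===== VERDICT (by name: the statement is the Claim_ definition above) =====
theorem unique_gaps_end_spec : Claim_equal_unique_gaps_end := by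
  intro list_gaps _
  unfold Spec_unique_gaps_end unique_gaps_end unique_gaps_end_alt
  exact (fold_eq list_gaps [] PySem.Dict.empty InvD_empty).symm
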